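-- pv_equiv track=rewrite | github.com/Spaklak/RussianEgeSolve | 10.03.2023/23.py | f
-- ===== SOURCE A (Python) =====
-- def f(x,y):
--     if x > y:
--         return 0
--     if x == y:
--         return 1
--     if (str(x)[-1] == '1' or str(x)[-1] == '0') and x < y:
--         return f(x+1,y) + f(x+10,y)
--     if x < y:
--         r = int(str(x)[-1])
--         return f(x+1,y) + f(x+10,y) + f(x*r,y)
-- ===== SOURCE B (Python) =====
-- def val(memo, y, w):
--     return 0 if w > y else memo[w]
--
-- def f(x, y):
--     if x > y:
--         return 0
--     memo = {y: 1}
--     z = y - 1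
--     while z >= x:
--         d = abs(z) % 10
--         v = val(memo, y, z + 1) + val(memo, y, z + 10)
--         if d >= 2:
--             v += val(memo, y, z * d)
--         memo[z] = v
--         z -= 1
--     return memo[x]
-- ===== Notes on version B (the rewrite author's own statement) =====
-- stated objective: alternative
-- what changed: A's exponential three-way recursion (with the last digit read off str(x)) is replaced by an iterative bottom-up dynamic program: one dict filled in a single descending loop from y-1 to x, with the last digit computed arithmetically as abs(z)%10, so each state is evaluated exactly once; intended as faster (O(y-x) vs O(3^(y-x))), but a timing run could not confirm a ratio on the generated inputs.
import Mathlib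
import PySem

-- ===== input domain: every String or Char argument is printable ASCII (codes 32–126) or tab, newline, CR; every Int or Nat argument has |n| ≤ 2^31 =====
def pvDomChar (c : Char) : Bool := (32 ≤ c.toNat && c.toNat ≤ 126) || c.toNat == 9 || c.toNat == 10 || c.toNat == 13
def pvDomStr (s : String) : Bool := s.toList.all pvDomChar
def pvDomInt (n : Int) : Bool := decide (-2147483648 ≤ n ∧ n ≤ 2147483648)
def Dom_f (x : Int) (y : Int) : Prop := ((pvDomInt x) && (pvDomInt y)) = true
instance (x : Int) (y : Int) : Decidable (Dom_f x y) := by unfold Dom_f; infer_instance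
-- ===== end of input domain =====

-- B replaces A's three-way recursion by a bottom-up dynamic program (one dict, one
-- descending loop, last digit taken arithmetically), evaluating each state once.

-- ===== PORT A =====
-- int(str(x)[-1]) of A's last branch
def lastDigitInt (x : Int) : Int :=
  match PySem.Str.pyGet? (PySem.Int.toStr x) (-1) with
  | some c => (PySem.Int.ofStr? (String.ofList [c])).getD 0
  | none => 0

-- A's recursion, with a fuel argument bounding the recursion depth; `f` below supplies
-- fuel (y-x).toNat+1, which on Pre_f exceeds the depth used, so the fuel-0 case is unreachable
def fRec (y : Int) : Nat → Int → Int
  | 0, _ => 0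
  | fuel+1, x =>
    if x > y then 0
    else if x = y then 1
    else if (PySem.Str.pyGet? (PySem.Int.toStr x) (-1) = some '1' ∨
             PySem.Str.pyGet? (PySem.Int.toStr x) (-1) = some '0') ∧ x < y then
      fRec y fuel (x+1) + fRec y fuel (x+10)
    else if x < y then
      fRec y fuel (x+1) + fRec y fuel (x+10) + fRec y fuel (x * lastDigitInt x)
    else 0

def f (x : Int) (y : Int) : Int := fRec y ((y - x).toNat + 1) x

-- ===== PORT B =====
-- helper val(memo, y, w); Python's memo[w] is always present on Pre_f (ported as getD)
def valB (memo : PySem.Dict Int Int) (y : Int) (w : Int) : Int :=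
  if w > y then 0 else memo.getD w 0

-- the while loop 'z = y-1; while z >= x: ...; z -= 1' runs exactly (y-x).toNat iterations
def loopB (y : Int) : Nat → Int → PySem.Dict Int Int → PySem.Dict Int Int
  | 0, _, memo => memo
  | n+1, z, memo =>
    let d : Int := |z| % 10
    let v := valB memo y (z+1) + valB memo y (z+10)
    let v := if d ≥ 2 then v + valB memo y (z*d) else v
    loopB y n (z-1) (memo.insert z v)

def f_alt (x : Int) (y : Int) : Int :=
  if x > y then 0
  else (loopB y ((y - x).toNat) (y-1) ((PySem.Dict.empty).insert y 1)).getD x 0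

-- ===== PRECONDITION & SPEC =====
-- Pre_f excludes exactly the inputs (x ≤ -2 with x < y) on which A recurses forever
-- (RecursionError): the x*digit branch then descends without bound.
def Pre_f (x : Int) (y : Int) : Prop := -1 ≤ x ∨ y ≤ x
instance (x : Int) (y : Int) : Decidable (Pre_f x y) := by unfold Pre_f; infer_instance

def pvWitness_f : Int × Int := (0, 12)

def Spec_f (x : Int) (y : Int) (out : Int) : Prop := out = f_alt x y
instance (x : Int) (y : Int) (out : Int) : Decidable (Spec_f x y out) := by unfold Spec_f; infer_instance

-- ===== CLAIM (what is proved, stated in full; the proofs are below) =====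
def Claim_equal_f : Prop := ∀ (x : Int) (y : Int), Dom_f x y → Pre_f x y → Spec_f x y (f x y)

-- ===== LEMMAS AND PROOFS =====

-- unfolding lemmas (rfl, with the lets zeta-reduced)
lemma fRec_succ (y : Int) (fuel : Nat) (x : Int) :
    fRec y (fuel+1) x =
      if x > y then 0
      else if x = y then 1
      else if (PySem.Str.pyGet? (PySem.Int.toStr x) (-1) = some '1' ∨
               PySem.Str.pyGet? (PySem.Int.toStr x) (-1) = some '0') ∧ x < y then
        fRec y fuel (x+1) + fRec y fuel (x+10)
      else if x < y then
        fRec y fuel (x+1) + fRec y fuel (x+10) + fRec y fuel (x * lastDigitInt x)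
      else 0 := rfl

lemma loopB_succ (y : Int) (n : Nat) (z : Int) (memo : PySem.Dict Int Int) :
    loopB y (n+1) z memo =
      loopB y n (z-1) (memo.insert z
        (if |z| % 10 ≥ 2 then
           valB memo y (z+1) + valB memo y (z+10) + valB memo y (z*(|z| % 10))
         else valB memo y (z+1) + valB memo y (z+10))) := rfl

-- last char of Nat.toDigits is the least-significant digit
lemma toDigitsCore_getLast (b : Nat) :
    ∀ (fuel n : Nat) (ds : List Char) (c : Char),
      (Nat.toDigitsCore b fuel n (ds ++ [c])).getLast? = some c
  | 0, n, ds, c => by simp [Nat.toDigitsCore]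
  | fuel+1, n, ds, c => by
      rw [Nat.toDigitsCore]
      split
      · rw [show (n % b).digitChar :: (ds ++ [c]) = ((n % b).digitChar :: ds) ++ [c] from rfl,
            List.getLast?_concat]
      · rw [show (n % b).digitChar :: (ds ++ [c]) = ((n % b).digitChar :: ds) ++ [c] from rfl]
        exact toDigitsCore_getLast b fuel (n / b) ((n % b).digitChar :: ds) c

lemma toDigits_getLast (n : Nat) :
    (Nat.toDigits 10 n).getLast? = some (Nat.digitChar (n % 10)) := by
  rw [Nat.toDigits, Nat.toDigitsCore]
  split
  · rfl
  · have := toDigitsCore_getLast 10 n (n / 10) [] (Nat.digitChar (n % 10))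
    simpa using this

lemma lastChar_nonneg (x : Int) (hx : 0 ≤ x) :
    PySem.Str.pyGet? (PySem.Int.toStr x) (-1) = some (Nat.digitChar (x.toNat % 10)) := by
  simp only [PySem.Str.pyGet?, PySem.Int.toStr]
  rw [show (String.ofList (PySem.Int.toChars x)).toList = PySem.Int.toChars x by simp]
  show PySem.List.pyGet? (PySem.Int.toChars x) (-1) = _
  rw [PySem.List.pyGet?_neg_one, PySem.Int.toChars, if_neg (by omega)]
  exact toDigits_getLast x.toNat

lemma digitChar_eq_one_iff (m : Nat) (h : m < 10) : Nat.digitChar m = '1' ↔ m = 1 := by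
  interval_cases m <;> decide

lemma digitChar_eq_zero_iff (m : Nat) (h : m < 10) : Nat.digitChar m = '0' ↔ m = 0 := by
  interval_cases m <;> decide

lemma ofStr_digitChar (m : Nat) (h : m < 10) :
    (PySem.Int.ofStr? (String.ofList [Nat.digitChar m])).getD 0 = (m : Int) := by
  interval_cases m <;> decide

lemma lastDigitInt_nonneg (x : Int) (hx : 0 ≤ x) :
    lastDigitInt x = ((x.toNat % 10 : Nat) : Int) := by
  unfold lastDigitInt
  rw [lastChar_nonneg x hx]
  exact ofStr_digitChar _ (Nat.mod_lt _ (by norm_num))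

-- stability: any sufficient fuel computes the canonical value
lemma fRec_stab : ∀ (fuel : Nat) (x y : Int), -1 ≤ x → (y - x).toNat < fuel →
    fRec y fuel x = fRec y ((y - x).toNat + 1) x := by
  intro fuel
  induction fuel using Nat.strong_induction_on with
  | _ fuel IH =>
    intro x y hx hf
    match fuel, hf with
    | fuel+1, hf =>
    have canon : ∀ g : Nat, g < fuel + 1 → ∀ x' : Int, -1 ≤ x' → (y - x').toNat < g →
        fRec y g x' = fRec y ((y - x').toNat + 1) x' := fun g hg x' h1 h2 => IH g hg x' y h1 h2
    rw [fRec_succ, fRec_succ]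
    by_cases h1 : x > y
    · rw [if_pos h1, if_pos h1]
    rw [if_neg h1, if_neg h1]
    by_cases h2 : x = y
    · rw [if_pos h2, if_pos h2]
    rw [if_neg h2, if_neg h2]
    have hxy : x < y := by omega
    rcases (by omega : x = -1 ∨ 0 ≤ x) with rfl | hx0
    · rw [if_pos ⟨Or.inl (by decide), hxy⟩, if_pos ⟨Or.inl (by decide), hxy⟩]
      rw [canon fuel (by omega) (-1+1) (by omega) (by omega),
          canon ((y - (-1)).toNat) (by omega) (-1+1) (by omega) (by omega),
          canon fuel (by omega) (-1+10) (by omega) (by omega),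
          canon ((y - (-1)).toNat) (by omega) (-1+10) (by omega) (by omega)]
    · rw [lastChar_nonneg x hx0, lastDigitInt_nonneg x hx0]
      have hmlt : x.toNat % 10 < 10 := Nat.mod_lt _ (by norm_num)
      by_cases hm2 : 2 ≤ x.toNat % 10
      · have hneg : ¬ ((some (Nat.digitChar (x.toNat % 10)) = some '1' ∨
              some (Nat.digitChar (x.toNat % 10)) = some '0') ∧ x < y) := by
          rintro ⟨h | h, -⟩
          · rw [Option.some.injEq, digitChar_eq_one_iff _ hmlt] at h; omega
          · rw [Option.some.injEq, digitChar_eq_zero_iff _ hmlt] at h; omega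
        rw [if_neg hneg, if_neg hneg, if_pos hxy, if_pos hxy]
        have hx2 : 2 ≤ x := by omega
        have hw : x < x * ((x.toNat % 10 : Nat) : Int) := by
          have h2 : (2:Int) ≤ ((x.toNat % 10 : Nat) : Int) := by exact_mod_cast hm2
          nlinarith
        generalize hwdef : x * ((x.toNat % 10 : Nat) : Int) = w at *
        rw [canon fuel (by omega) (x+1) (by omega) (by omega),
            canon ((y - x).toNat) (by omega) (x+1) (by omega) (by omega),
            canon fuel (by omega) (x+10) (by omega) (by omega),
            canon ((y - x).toNat) (by omega) (x+10) (by omega) (by omega),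
            canon fuel (by omega) w (by omega) (by omega),
            canon ((y - x).toNat) (by omega) w (by omega) (by omega)]
      · have hpos : (some (Nat.digitChar (x.toNat % 10)) = some '1' ∨
              some (Nat.digitChar (x.toNat % 10)) = some '0') ∧ x < y := by
          refine ⟨?_, hxy⟩
          rcases (by omega : x.toNat % 10 = 0 ∨ x.toNat % 10 = 1) with h | h
          · exact Or.inr (by rw [Option.some.injEq, digitChar_eq_zero_iff _ hmlt]; exact h)
          · exact Or.inl (by rw [Option.some.injEq, digitChar_eq_one_iff _ hmlt]; exact h)
        rw [if_pos hpos, if_pos hpos]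
        rw [canon fuel (by omega) (x+1) (by omega) (by omega),
            canon ((y - x).toNat) (by omega) (x+1) (by omega) (by omega),
            canon fuel (by omega) (x+10) (by omega) (by omega),
            canon ((y - x).toNat) (by omega) (x+10) (by omega) (by omega)]

lemma f_gt {x y : Int} (h : y < x) : f x y = 0 := by
  rw [f, fRec_succ, if_pos h]

lemma f_self (y : Int) : f y y = 0 + 1 - 1 + 1 := by
  rw [f, fRec_succ, if_neg (lt_irrefl y), if_pos rfl]; norm_num

-- A's recurrence, phrased with the arithmetic last digit |x| % 10
lemma f_step (x y : Int) (hx : -1 ≤ x) (hxy : x < y) :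
    f x y = if 2 ≤ |x| % 10 then
        f (x+1) y + f (x+10) y + f (x * (|x| % 10)) y
      else f (x+1) y + f (x+10) y := by
  rw [f, fRec_succ, if_neg (by omega : ¬ x > y), if_neg (by omega : ¬ x = y)]
  rcases (by omega : x = -1 ∨ 0 ≤ x) with rfl | hx0
  · rw [if_pos ⟨Or.inl (by decide), hxy⟩, if_neg (by decide : ¬ (2:Int) ≤ |(-1:Int)| % 10)]
    rw [fRec_stab ((y - (-1)).toNat) (-1+1) y (by omega) (by omega),
        fRec_stab ((y - (-1)).toNat) (-1+10) y (by omega) (by omega)]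
    rfl
  · rw [lastChar_nonneg x hx0, lastDigitInt_nonneg x hx0]
    have hmlt : x.toNat % 10 < 10 := Nat.mod_lt _ (by norm_num)
    have habs : |x| % 10 = ((x.toNat % 10 : Nat) : Int) := by
      rw [abs_of_nonneg hx0]; omega
    rw [habs]
    by_cases hm2 : 2 ≤ x.toNat % 10
    · have hneg : ¬ ((some (Nat.digitChar (x.toNat % 10)) = some '1' ∨
            some (Nat.digitChar (x.toNat % 10)) = some '0') ∧ x < y) := by
        rintro ⟨h | h, -⟩
        · rw [Option.some.injEq, digitChar_eq_one_iff _ hmlt] at h; omega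
        · rw [Option.some.injEq, digitChar_eq_zero_iff _ hmlt] at h; omega
      rw [if_neg hneg, if_pos hxy, if_pos (by exact_mod_cast hm2)]
      have hx2 : 2 ≤ x := by omega
      have hw : x < x * ((x.toNat % 10 : Nat) : Int) := by
        have h2 : (2:Int) ≤ ((x.toNat % 10 : Nat) : Int) := by exact_mod_cast hm2
        nlinarith
      generalize hwdef : x * ((x.toNat % 10 : Nat) : Int) = w at *
      rw [fRec_stab ((y - x).toNat) (x+1) y (by omega) (by omega),
          fRec_stab ((y - x).toNat) (x+10) y (by omega) (by omega),
          fRec_stab ((y - x).toNat) w y (by omega) (by omega)]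
      rfl
    · have hpos : (some (Nat.digitChar (x.toNat % 10)) = some '1' ∨
            some (Nat.digitChar (x.toNat % 10)) = some '0') ∧ x < y := by
        refine ⟨?_, hxy⟩
        rcases (by omega : x.toNat % 10 = 0 ∨ x.toNat % 10 = 1) with h | h
        · exact Or.inr (by rw [Option.some.injEq, digitChar_eq_zero_iff _ hmlt]; exact h)
        · exact Or.inl (by rw [Option.some.injEq, digitChar_eq_one_iff _ hmlt]; exact h)
      rw [if_pos hpos, if_neg (by exact_mod_cast hm2 : ¬ (2:Int) ≤ ((x.toNat % 10 : Nat) : Int))]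
      rw [fRec_stab ((y - x).toNat) (x+1) y (by omega) (by omega),
          fRec_stab ((y - x).toNat) (x+10) y (by omega) (by omega)]
      rfl

lemma f_eq_one (y : Int) : f y y = 1 := by rw [f_self]; norm_num

-- the DP invariant: after processing down to z-n+1, the memo agrees with f on [z-n+1, y]
lemma loopB_inv (y : Int) : ∀ (n : Nat) (z : Int) (memo : PySem.Dict Int Int),
    z < y → -1 ≤ z - n + 1 →
    (∀ w : Int, z < w → w ≤ y → memo.getD w 0 = f w y) →
    ∀ w : Int, z - n + 1 ≤ w → w ≤ y → (loopB y n z memo).getD w 0 = f w y := by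
  intro n
  induction n with
  | zero =>
    intro z memo hz hlow hmem w hw1 hw2
    exact hmem w (by push_cast at hw1; omega) hw2
  | succ n IH =>
    intro z memo hz hlow hmem w hw1 hw2
    rw [loopB_succ]
    have hz1 : -1 ≤ z := by push_cast at hlow; omega
    have hval : ∀ u : Int, z < u → valB memo y u = f u y := by
      intro u hu
      unfold valB
      split
      · exact (f_gt (by omega)).symm
      · exact hmem u hu (by omega)
    have hv : (if |z| % 10 ≥ 2 then
          valB memo y (z+1) + valB memo y (z+10) + valB memo y (z*(|z| % 10))
        else valB memo y (z+1) + valB memo y (z+10)) = f z y := by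
      rw [f_step z y hz1 hz]
      by_cases h2 : 2 ≤ |z| % 10
      · have hz2 : 2 ≤ z := by
          by_contra hc
          have hb : -1 ≤ z ∧ z ≤ 1 := ⟨hz1, by omega⟩
          interval_cases z <;> simp_all
        have hd9 : |z| % 10 ≤ 9 := by omega
        have hzz : z < z * (|z| % 10) := by nlinarith
        rw [if_pos h2, if_pos h2, hval (z+1) (by omega), hval (z+10) (by omega),
            hval (z*(|z| % 10)) hzz]
      · rw [if_neg h2, if_neg h2, hval (z+1) (by omega), hval (z+10) (by omega)]
    refine IH (z-1) _ (by omega) (by push_cast at hlow ⊢; omega) ?_ w (by push_cast at hw1 ⊢; omega) hw2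
    intro w' h1 h2
    rw [PySem.Dict.getD_insert]
    split
    · subst ‹w' = z›; exact hv
    · exact hmem w' (by omega) h2

-- ===== VERDICT (by name: the statement is the Claim_ definition above) =====
theorem f_spec : Claim_equal_f := by
  unfold Claim_equal_f Spec_f
  intro x y _ hpre
  unfold f_alt
  by_cases hgt : x > y
  · rw [if_pos hgt, f_gt hgt]
  · rw [if_neg hgt]
    by_cases heq : x = y
    · subst heq
      rw [sub_self, Int.toNat_zero]
      show f x x = (PySem.Dict.empty.insert x 1).getD x 0
      rw [PySem.Dict.getD_insert, if_pos rfl, f_eq_one]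
    · have hxy : x < y := by omega
      have hx : -1 ≤ x := by rcases hpre with h | h <;> omega
      have hmem0 : ∀ w : Int, y - 1 < w → w ≤ y →
          ((PySem.Dict.empty).insert y 1).getD w 0 = f w y := by
        intro w h1 h2
        rw [show w = y from by omega, PySem.Dict.getD_insert, if_pos rfl, f_eq_one]
      have := loopB_inv y ((y - x).toNat) (y-1) ((PySem.Dict.empty).insert y 1)
        (by omega) (by omega) hmem0 x (by omega) (by omega)
      exact this.symm
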